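-- pv_equiv track=rewrite | github.com/YarinAtias/PvP-Chess-GUI | chess/chess gui.py | detect_square
-- ===== SOURCE A (Python) =====
-- BOARD_SQUARES_POS = [
--     (15, 10), (100, 10), (190, 10), (275, 10), (365, 10), (450, 10), (540, 10), (630, 10),
--     (15, 80), (100, 80), (190, 80), (275, 80), (365, 80), (450, 80), (540, 80), (630, 80),
--     (15, 160), (100, 160), (190, 160), (275, 160), (365, 160), (450, 160), (540, 160), (630, 160),
--     (15, 230), (100, 230), (190, 230), (275, 230), (365, 230), (450, 230), (540, 230), (630, 230),
--     (15, 310), (100, 310), (190, 310), (275, 310), (365, 310), (450, 310), (540, 310), (630, 310),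
--     (15, 380), (100, 380), (190, 380), (275, 380), (365, 380), (450, 380), (540, 380), (630, 380),
--     (15, 450), (100, 450), (190, 450), (275, 450), (365, 450), (450, 450), (540, 450), (630, 450),
--     (15, 530), (100, 530), (190, 530), (275, 530), (365, 530), (450, 530), (540, 530), (630, 530),
-- ]
--
-- def detect_square(mouse_x: int, mouse_y: int):
--     square_x = None
--     square_y = None
--     for x, y in BOARD_SQUARES_POS:
--         if x - 10 <= mouse_x <= x + 60:
--             square_x = x
--         if y - 10 <= mouse_y <= y + 50:
--             square_y = y
--         if square_x is not None and square_y is not None: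
--             return square_x, square_y
--     return None
-- ===== SOURCE B (Python) =====
-- COL_XS = [15, 100, 190, 275, 365, 450, 540, 630]
-- ROW_YS = [10, 80, 160, 230, 310, 380, 450, 530]
--
-- def detect_square(mouse_x: int, mouse_y: int):
--     sx = next((x for x in COL_XS if x - 10 <= mouse_x <= x + 60), None)
--     sy = next((y for y in ROW_YS if y - 10 <= mouse_y <= y + 50), None)
--     if sx is not None and sy is not None:
--         return sx, sy
--     return None
-- ===== Notes on version B (the rewrite author's own statement) =====
-- stated objective: simpler
-- what changed: Replaces the single stateful scan over the 64 interleaved (x,y) board pairs with two independent 1-D axis lookups (first matching column x and first matching row y over 8-element lists), combined only at the end.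
import Mathlib
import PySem

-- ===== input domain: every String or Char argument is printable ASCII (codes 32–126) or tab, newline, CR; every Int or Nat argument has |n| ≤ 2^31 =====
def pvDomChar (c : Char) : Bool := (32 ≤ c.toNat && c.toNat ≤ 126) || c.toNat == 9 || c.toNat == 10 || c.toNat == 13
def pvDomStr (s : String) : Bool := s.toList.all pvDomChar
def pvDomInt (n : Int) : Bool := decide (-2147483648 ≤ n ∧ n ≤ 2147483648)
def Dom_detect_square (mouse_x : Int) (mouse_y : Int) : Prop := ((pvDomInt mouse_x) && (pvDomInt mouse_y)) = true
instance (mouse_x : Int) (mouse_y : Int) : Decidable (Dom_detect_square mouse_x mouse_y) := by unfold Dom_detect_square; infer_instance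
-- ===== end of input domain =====

-- B replaces A's single stateful scan over the 64 interleaved (x,y) pairs by two
-- independent first-match axis lookups over 8-element column/row lists (objective: simpler).

-- ===== PORT A =====
def pvBoardSquaresPos : List (Int × Int) := [(15, 10), (100, 10), (190, 10), (275, 10), (365, 10), (450, 10), (540, 10), (630, 10), (15, 80), (100, 80), (190, 80), (275, 80), (365, 80), (450, 80), (540, 80), (630, 80), (15, 160), (100, 160), (190, 160), (275, 160), (365, 160), (450, 160), (540, 160), (630, 160), (15, 230), (100, 230), (190, 230), (275, 230), (365, 230), (450, 230), (540, 230), (630, 230), (15, 310), (100, 310), (190, 310), (275, 310), (365, 310), (450, 310), (540, 310), (630, 310), (15, 380), (100, 380), (190, 380), (275, 380), (365, 380), (450, 380), (540, 380), (630, 380), (15, 450), (100, 450), (190, 450), (275, 450), (365, 450), (450, 450), (540, 450), (630, 450), (15, 530), (100, 530), (190, 530), (275, 530), (365, 530), (450, 530), (540, 530), (630, 530)]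

-- the Python for-loop with its two mutable Option states and early return
def pvLoopA (mx my : Int) : List (Int × Int) → Option Int → Option Int → Option (Int × Int)
  | [], _, _ => none
  | (x, y) :: rest, sx, sy =>
    let sx' := if x - 10 ≤ mx ∧ mx ≤ x + 60 then some x else sx
    let sy' := if y - 10 ≤ my ∧ my ≤ y + 50 then some y else sy
    match sx', sy' with
    | some a, some b => some (a, b)
    | ox, oy => pvLoopA mx my rest ox oy

def detect_square (mouse_x : Int) (mouse_y : Int) : Option (Int × Int) :=
  pvLoopA mouse_x mouse_y pvBoardSquaresPos none none

-- ===== PORT B =====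
def pvColXs : List Int := [15, 100, 190, 275, 365, 450, 540, 630]
def pvRowYs : List Int := [10, 80, 160, 230, 310, 380, 450, 530]

def detect_square_alt (mouse_x : Int) (mouse_y : Int) : Option (Int × Int) :=
  match pvColXs.find? (fun x => decide (x - 10 ≤ mouse_x ∧ mouse_x ≤ x + 60)),
        pvRowYs.find? (fun y => decide (y - 10 ≤ mouse_y ∧ mouse_y ≤ y + 50)) with
  | some sx, some sy => some (sx, sy)
  | _, _ => none

-- ===== PRECONDITION & SPEC =====
def Spec_detect_square (mouse_x : Int) (mouse_y : Int) (out : Option (Int × Int)) : Prop := out = detect_square_alt mouse_x mouse_y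
instance (mouse_x : Int) (mouse_y : Int) (out : Option (Int × Int)) : Decidable (Spec_detect_square mouse_x mouse_y out) := by unfold Spec_detect_square; infer_instance

-- ===== CLAIM (what is proved, stated in full; the proofs are below) =====
def Claim_equal_detect_square : Prop := ∀ (mouse_x : Int) (mouse_y : Int), Dom_detect_square mouse_x mouse_y → Spec_detect_square mouse_x mouse_y (detect_square mouse_x mouse_y)

-- ===== LEMMAS AND PROOFS =====

lemma pvFind_cons_pos (m a b c : Int) (cs : List Int) (h : c - a ≤ m ∧ m ≤ c + b) :
    (c :: cs).find? (fun x => decide (x - a ≤ m ∧ m ≤ x + b)) = some c :=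
  List.find?_cons_of_pos (by simpa using h)

lemma pvFind_cons_neg (m a b c : Int) (cs : List Int) (h : ¬ (c - a ≤ m ∧ m ≤ c + b)) :
    (c :: cs).find? (fun x => decide (x - a ≤ m ∧ m ≤ x + b))
      = cs.find? (fun x => decide (x - a ≤ m ∧ m ≤ x + b)) :=
  List.find?_cons_of_neg (by simpa using h)


-- final column state after a row in which the row's y-test failed
def pvColUpd (mx : Int) : List Int → Option Int → Option Int
  | [], sx => sx
  | c :: cs, sx => pvColUpd mx cs (if c - 10 ≤ mx ∧ mx ≤ c + 60 then some c else sx)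

-- the column bands are pairwise disjoint
lemma pvCol_unique {mx c c' : Int} (hc : c ∈ pvColXs) (hc' : c' ∈ pvColXs)
    (h1 : c - 10 ≤ mx ∧ mx ≤ c + 60) (h2 : c' - 10 ≤ mx ∧ mx ≤ c' + 60) : c = c' := by
  fin_cases hc <;> fin_cases hc' <;> omega

lemma pvFC_of_px {mx c : Int} (hc : c ∈ pvColXs) (h : c - 10 ≤ mx ∧ mx ≤ c + 60) :
    pvColXs.find? (fun x => decide (x - 10 ≤ mx ∧ mx ≤ x + 60)) = some c := by
  cases hFC : pvColXs.find? (fun x => decide (x - 10 ≤ mx ∧ mx ≤ x + 60)) with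
  | none =>
    exact absurd (decide_eq_true h) (by simpa using List.find?_eq_none.mp hFC c hc)
  | some c0 =>
    have h0 := List.find?_some hFC
    simp only [decide_eq_true_eq] at h0
    rw [pvCol_unique (List.mem_of_find?_eq_some hFC) hc h0 h]

lemma pvRowSkip (mx my y : Int) (hy : ¬ (y - 10 ≤ my ∧ my ≤ y + 50)) :
    ∀ (cs : List Int) (rest : List (Int × Int)) (sx : Option Int),
      pvLoopA mx my (cs.map (fun x => (x, y)) ++ rest) sx none
        = pvLoopA mx my rest (pvColUpd mx cs sx) none := by
  intro cs
  induction cs with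
  | nil => intro rest sx; rw [List.map_nil, List.nil_append, pvColUpd]
  | cons c cs ih =>
    intro rest sx
    rw [List.map_cons, List.cons_append, pvColUpd]
    simp only [pvLoopA, if_neg hy]
    by_cases hc : c - 10 ≤ mx ∧ mx ≤ c + 60
    · rw [if_pos hc]
      exact ih rest (some c)
    · rw [if_neg hc]
      cases sx <;> exact ih rest _

lemma pvColUpd_inv (mx : Int) :
    ∀ (cs : List Int) (sx : Option Int), (∀ c ∈ cs, c ∈ pvColXs) →
      (sx = none ∨ sx = pvColXs.find? (fun x => decide (x - 10 ≤ mx ∧ mx ≤ x + 60))) →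
      (pvColUpd mx cs sx = none ∨
        pvColUpd mx cs sx = pvColXs.find? (fun x => decide (x - 10 ≤ mx ∧ mx ≤ x + 60))) := by
  intro cs
  induction cs with
  | nil => intro sx _ hsx; rw [pvColUpd]; exact hsx
  | cons c cs ih =>
    intro sx hmem hsx
    rw [pvColUpd]
    by_cases hc : c - 10 ≤ mx ∧ mx ≤ c + 60
    · refine ih _ (fun c' h' => hmem c' (List.mem_cons_of_mem c h')) ?_
      rw [if_pos hc]
      exact Or.inr (pvFC_of_px (hmem c List.mem_cons_self) hc).symm
    · refine ih _ (fun c' h' => hmem c' (List.mem_cons_of_mem c h')) ?_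
      rw [if_neg hc]
      exact hsx

lemma pvRowHit (mx my y : Int) (hy : y - 10 ≤ my ∧ my ≤ y + 50) :
    ∀ (cs : List Int) (rest : List (Int × Int)) (sy0 : Option Int),
      pvLoopA mx my (cs.map (fun x => (x, y)) ++ rest) none sy0
        = match cs.find? (fun x => decide (x - 10 ≤ mx ∧ mx ≤ x + 60)) with
          | some c => some (c, y)
          | none => pvLoopA mx my rest none (if cs = [] then sy0 else some y) := by
  intro cs
  induction cs with
  | nil => intro rest sy0; rw [List.map_nil, List.nil_append, List.find?_nil, if_pos rfl]
  | cons c cs ih =>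
    intro rest sy0
    rw [List.map_cons, List.cons_append]
    simp only [pvLoopA, if_pos hy]
    by_cases hc : c - 10 ≤ mx ∧ mx ≤ c + 60
    · rw [if_pos hc, pvFind_cons_pos mx 10 60 c cs hc]
    · rw [if_neg hc, pvFind_cons_neg mx 10 60 c cs hc,
        if_neg (List.cons_ne_nil c cs)]
      have h := ih rest (some y)
      rw [ite_self] at h
      exact h

lemma pvNoCol (mx my : Int) :
    ∀ (l : List (Int × Int)), (∀ p ∈ l, ¬ (p.1 - 10 ≤ mx ∧ mx ≤ p.1 + 60)) →
      ∀ sy, pvLoopA mx my l none sy = none := by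
  intro l
  induction l with
  | nil => intro _ sy; rfl
  | cons p l ih =>
    obtain ⟨x, y⟩ := p
    intro h sy
    have hx : ¬ (x - 10 ≤ mx ∧ mx ≤ x + 60) := h (x, y) List.mem_cons_self
    simp only [pvLoopA, if_neg hx]
    by_cases hpy : y - 10 ≤ my ∧ my ≤ y + 50
    · rw [if_pos hpy]
      exact ih (fun q hq => h q (List.mem_cons_of_mem _ hq)) (some y)
    · rw [if_neg hpy]
      cases sy <;> exact ih (fun q hq => h q (List.mem_cons_of_mem _ hq)) _

lemma pvMain (mx my : Int) :
    ∀ (ys : List Int) (sx : Option Int),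
      (sx = none ∨ sx = pvColXs.find? (fun x => decide (x - 10 ≤ mx ∧ mx ≤ x + 60))) →
      pvLoopA mx my (ys.flatMap (fun y => pvColXs.map (fun x => (x, y)))) sx none
        = match pvColXs.find? (fun x => decide (x - 10 ≤ mx ∧ mx ≤ x + 60)),
                ys.find? (fun y => decide (y - 10 ≤ my ∧ my ≤ y + 50)) with
          | some c, some r => some (c, r)
          | _, _ => none := by
  intro ys
  induction ys with
  | nil =>
    intro sx _
    rw [List.flatMap_nil, List.find?_nil]
    cases pvColXs.find? (fun x => decide (x - 10 ≤ mx ∧ mx ≤ x + 60)) <;> rfl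
  | cons y ys ih =>
    intro sx hsx
    rw [List.flatMap_cons]
    by_cases hy : y - 10 ≤ my ∧ my ≤ y + 50
    · rw [pvFind_cons_pos my 10 50 y ys hy]
      cases hFC : pvColXs.find? (fun x => decide (x - 10 ≤ mx ∧ mx ≤ x + 60)) with
      | none =>
        have hsx0 : sx = none := by
          rcases hsx with rfl | rfl
          · rfl
          · exact hFC
        subst hsx0
        rw [pvRowHit mx my y hy, hFC]
        have hne : ¬ (pvColXs = []) := by simp [pvColXs]
        rw [if_neg hne]
        have hnone := List.find?_eq_none.mp hFC
        refine pvNoCol mx my _ (fun p hp => ?_) _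
        simp only [List.mem_flatMap, List.mem_map] at hp
        obtain ⟨y', _, x, hxm, rfl⟩ := hp
        exact fun hpx => by simpa using (hnone x hxm) (decide_eq_true hpx)
      | some c =>
        rcases hsx with rfl | h2
        · rw [pvRowHit mx my y hy, hFC]
        · rw [hFC] at h2
          subst h2
          rw [show pvColXs = (15 : Int) :: [100, 190, 275, 365, 450, 540, 630] from rfl]
          rw [List.map_cons, List.cons_append]
          simp only [pvLoopA, if_pos hy]
          by_cases h15 : (15 : Int) - 10 ≤ mx ∧ mx ≤ 15 + 60
          · have hc15 : c = 15 := by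
              rw [show pvColXs = (15 : Int) :: [100, 190, 275, 365, 450, 540, 630] from rfl,
                pvFind_cons_pos mx 10 60 15 [100, 190, 275, 365, 450, 540, 630] h15] at hFC
              exact (Option.some.inj hFC).symm
            subst hc15
            rw [if_pos h15]
          · rw [if_neg h15]
    · rw [pvFind_cons_neg my 10 50 y ys hy]
      rw [pvRowSkip mx my y hy pvColXs _ sx]
      exact ih _ (pvColUpd_inv mx pvColXs sx (fun c hc => hc) hsx)

theorem detect_square_eq (mx my : Int) : detect_square mx my = detect_square_alt mx my := by
  have hpairs : pvBoardSquaresPos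
      = pvRowYs.flatMap (fun y => pvColXs.map (fun x => (x, y))) := by rfl
  unfold detect_square detect_square_alt
  rw [hpairs, pvMain mx my pvRowYs none (Or.inl rfl)]

-- ===== VERDICT (by name: the statement is the Claim_ definition above) =====
theorem detect_square_spec : Claim_equal_detect_square := by
  intro mx my _
  unfold Spec_detect_square
  exact detect_square_eq mx my
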